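-- pv_equiv track=rewrite | github.com/oss-esso/Full-Optimizer | VRPExample/test_moda_ortools.py | validate_time_constraints
-- ===== SOURCE A (Python) =====
-- def validate_time_constraints(routes, locations, vehicle_time_limits):
--     """Basic validation of time constraints (simplified)."""
--     violations = 0
--
--     for vehicle_id, route in routes.items():
--         if len(route) <= 2:
--             continue
--
--         # Estimate total route time (simplified - just count stops and distances)
--         estimated_time = len(route) * 15  # Assume 15 minutes per stop including service time
--
--         # Add travel time estimate (simplified)
--         for i in range(len(route) - 1):
--             # Simplified distance calculation - would need actual distance matrix
--             estimated_time += 10  # Assume 10 minutes between stops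
--
--         # Check against vehicle time limit
--         max_time = next(iter(vehicle_time_limits)) if vehicle_time_limits else 600
--         if max_time and estimated_time > max_time:
--             violations += 1
--
--     return violations
-- ===== SOURCE B (Python) =====
-- def validate_time_constraints(routes, locations, vehicle_time_limits):
--     """Closed-form per-route time estimate; limit computed once outside the loop."""
--     max_time = vehicle_time_limits[0] if vehicle_time_limits else 600
--     if not max_time:
--         return 0
--     return sum(1 for route in routes.values()
--                if len(route) > 2 and 25 * len(route) - 10 > max_time)
-- ===== Notes on version B (the rewrite author's own statement) =====
-- stated objective: simpler
-- what changed: Replaces the inner per-stop loop with the closed form 25*len(route)-10, hoists the time limit out of the loop (returning 0 immediately when it is falsy), and counts violating routes with a single generator-sum.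
import Mathlib
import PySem

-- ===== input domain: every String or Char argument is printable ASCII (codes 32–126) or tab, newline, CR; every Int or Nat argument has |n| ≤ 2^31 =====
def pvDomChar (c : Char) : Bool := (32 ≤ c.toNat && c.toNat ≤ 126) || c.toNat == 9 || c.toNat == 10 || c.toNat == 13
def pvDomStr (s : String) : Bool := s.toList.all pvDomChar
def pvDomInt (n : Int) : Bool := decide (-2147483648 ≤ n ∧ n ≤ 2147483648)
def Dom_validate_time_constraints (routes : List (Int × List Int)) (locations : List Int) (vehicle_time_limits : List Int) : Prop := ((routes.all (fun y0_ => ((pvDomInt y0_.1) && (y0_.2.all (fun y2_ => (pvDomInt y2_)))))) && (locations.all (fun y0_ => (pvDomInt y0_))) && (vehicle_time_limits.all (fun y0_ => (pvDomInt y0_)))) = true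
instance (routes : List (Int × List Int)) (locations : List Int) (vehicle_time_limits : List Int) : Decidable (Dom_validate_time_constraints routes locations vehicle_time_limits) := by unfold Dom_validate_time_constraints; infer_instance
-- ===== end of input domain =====

-- ===== PORT A =====
-- B replaces the inner per-stop loop with the closed form 25*len-10, hoists the limit out of the loop, and counts violating routes in a single pass.
def validate_time_constraints (routes : List (Int × List Int)) (locations : List Int) (vehicle_time_limits : List Int) : Int :=
  routes.foldl (fun violations p =>
    let route := p.2
    if route.length ≤ 2 then violations
    else
      -- estimated_time = len(route) * 15
      let est0 : Int := (route.length : Int) * 15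
      -- for i in range(len(route) - 1): estimated_time += 10
      let est := (PySem.List.pyRange 0 ((route.length : Int) - 1) 1).foldl (fun e _ => e + 10) est0
      -- max_time = next(iter(vehicle_time_limits)) if vehicle_time_limits else 600
      let max_time : Int := match vehicle_time_limits with
        | [] => 600
        | t :: _ => t
      if max_time ≠ 0 ∧ est > max_time then violations + 1 else violations) 0

-- ===== PORT B =====
def validate_time_constraints_alt (routes : List (Int × List Int)) (locations : List Int) (vehicle_time_limits : List Int) : Int :=
  let max_time : Int := vehicle_time_limits.headD 600
  if max_time = 0 then 0
  else (routes.countP (fun p => decide (2 < p.2.length ∧ max_time < 25 * (p.2.length : Int) - 10)) : Int)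

-- ===== PRECONDITION & SPEC =====
def Spec_validate_time_constraints (routes : List (Int × List Int)) (locations : List Int) (vehicle_time_limits : List Int) (out : Int) : Prop := out = validate_time_constraints_alt routes locations vehicle_time_limits
instance (routes : List (Int × List Int)) (locations : List Int) (vehicle_time_limits : List Int) (out : Int) : Decidable (Spec_validate_time_constraints routes locations vehicle_time_limits out) := by unfold Spec_validate_time_constraints; infer_instance

-- ===== CLAIM (what is proved, stated in full; the proofs are below) =====
def Claim_equal_validate_time_constraints : Prop := ∀ (routes : List (Int × List Int)) (locations : List Int) (vehicle_time_limits : List Int), Dom_validate_time_constraints routes locations vehicle_time_limits → Spec_validate_time_constraints routes locations vehicle_time_limits (validate_time_constraints routes locations vehicle_time_limits)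

-- ===== LEMMAS AND PROOFS =====

-- ===== VERDICT (by name: the statement is the Claim_ definition above) =====
-- folding '+10' over a list adds 10 * length
theorem pv_foldl_add10 (l : List Int) (x : Int) :
    l.foldl (fun e _ => e + 10) x = x + 10 * l.length := by
  induction l generalizing x with
  | nil => simp
  | cons a t ih => simp [List.foldl, ih]; ring

theorem pv_step (m : Int) (hm : m ≠ 0) (routes : List (Int × List Int)) (acc : Int) :
    routes.foldl (fun violations p =>
      let route := p.2
      if route.length ≤ 2 then violations
      else
        let est0 : Int := (route.length : Int) * 15
        let est := (PySem.List.pyRange 0 ((route.length : Int) - 1) 1).foldl (fun e _ => e + 10) est0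
        if m ≠ 0 ∧ est > m then violations + 1 else violations) acc
    = acc + (routes.countP (fun p => decide (2 < p.2.length ∧ m < 25 * (p.2.length : Int) - 10)) : Int) := by
  induction routes generalizing acc with
  | nil => simp
  | cons p t ih =>
    simp only [List.foldl, List.countP_cons]
    rw [ih]
    rw [pv_foldl_add10, PySem.List.length_pyRange_one]
    by_cases h2 : p.2.length ≤ 2
    · have hc : ¬ (2 < p.2.length ∧ m < 25 * (p.2.length : Int) - 10) := by omega
      simp [h2, hc]
    · have hl : 2 < p.2.length := by omega
      have hcast : ((((p.2.length : Int) - 1 - 0).toNat : Int)) = (p.2.length : Int) - 1 := by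
        omega
      by_cases hv : m < 25 * (p.2.length : Int) - 10
      · have hgt : (p.2.length : Int) * 15 + 10 * ((((p.2.length : Int) - 1 - 0).toNat : Int)) > m := by
          rw [hcast]; omega
        have hc : (2 < p.2.length ∧ m < 25 * (p.2.length : Int) - 10) := ⟨hl, hv⟩
        simp only [h2, if_false, hm, ne_eq, not_false_iff, true_and]
        rw [if_pos]
        · simp [hc]; push_cast; ring
        · simpa using hgt
      · have hng : ¬ ((p.2.length : Int) * 15 + 10 * ((((p.2.length : Int) - 1 - 0).toNat : Int)) > m) := by
          rw [hcast]; omega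
        have hc : ¬ (2 < p.2.length ∧ m < 25 * (p.2.length : Int) - 10) := fun h => hv h.2
        simp only [h2, if_false, hm, ne_eq, not_false_iff, true_and]
        rw [if_neg]
        · simp [hc]
        · simpa using hng

-- m = 0: every branch leaves the accumulator unchanged
theorem pv_zero (routes : List (Int × List Int)) (acc : Int) :
    routes.foldl (fun violations p =>
      let route := p.2
      if route.length ≤ 2 then violations
      else
        let est0 : Int := (route.length : Int) * 15
        let est := (PySem.List.pyRange 0 ((route.length : Int) - 1) 1).foldl (fun e _ => e + 10) est0
        if (0 : Int) ≠ 0 ∧ est > 0 then violations + 1 else violations) acc = acc := by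
  induction routes generalizing acc with
  | nil => rfl
  | cons p t ih => simp only [List.foldl]; rw [← ih (acc := acc)]; congr 1; simp

-- ===== VERDICT (by name: the statement is the Claim_ definition above) =====
theorem validate_time_constraints_spec : Claim_equal_validate_time_constraints := by
  intro routes locations vtl _
  unfold Spec_validate_time_constraints validate_time_constraints validate_time_constraints_alt
  cases vtl with
  | nil =>
    simp only [List.headD]
    rw [if_neg (by norm_num : (600 : Int) ≠ 0)]
    simpa using pv_step 600 (by norm_num) routes 0
  | cons t rest =>
    simp only [List.headD]
    by_cases hm : t = 0
    · subst hm
      rw [if_pos rfl]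
      simpa using pv_zero routes 0
    · rw [if_neg hm]
      simpa using pv_step t hm routes 0
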